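-- pv_equiv track=rewrite | github.com/Liangjh40/packet_py_project | Src/manager/encryptManager.py | _should_skip_path
-- ===== SOURCE A (Python) =====
-- def _should_skip_path(rel_path, skip_dirs):
--     if not skip_dirs:
--         return False
--     norm_path = rel_path.replace("\\", "/").strip("/")
--     for entry in skip_dirs:
--         entry_norm = str(entry).replace("\\", "/").strip("/")
--         if not entry_norm:
--             continue
--         if "/" in entry_norm:
--             if norm_path == entry_norm or norm_path.startswith(entry_norm + "/"):
--                 return True
--         else:
--             if norm_path == entry_norm or norm_path.startswith(entry_norm + "/"):
--                 return True
--     return False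
-- ===== SOURCE B (Python) =====
-- def _should_skip_path(rel_path, skip_dirs):
--     def _norm(s):
--         return str(s).replace("\\", "/").strip("/")
--     entries = {e for e in map(_norm, skip_dirs) if e}
--     norm_path = _norm(rel_path)
--     if norm_path in entries:
--         return True
--     return any(ch == "/" and norm_path[:i] in entries
--                for i, ch in enumerate(norm_path))
-- ===== Notes on version B (the rewrite author's own statement) =====
-- stated objective: alternative
-- what changed: B builds a set of normalized non-empty skip entries once and probes it with the path and each '/'-boundary prefix of the path, instead of A's per-entry loop running string-prefix (startswith) tests against the path.
import Mathlib
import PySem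

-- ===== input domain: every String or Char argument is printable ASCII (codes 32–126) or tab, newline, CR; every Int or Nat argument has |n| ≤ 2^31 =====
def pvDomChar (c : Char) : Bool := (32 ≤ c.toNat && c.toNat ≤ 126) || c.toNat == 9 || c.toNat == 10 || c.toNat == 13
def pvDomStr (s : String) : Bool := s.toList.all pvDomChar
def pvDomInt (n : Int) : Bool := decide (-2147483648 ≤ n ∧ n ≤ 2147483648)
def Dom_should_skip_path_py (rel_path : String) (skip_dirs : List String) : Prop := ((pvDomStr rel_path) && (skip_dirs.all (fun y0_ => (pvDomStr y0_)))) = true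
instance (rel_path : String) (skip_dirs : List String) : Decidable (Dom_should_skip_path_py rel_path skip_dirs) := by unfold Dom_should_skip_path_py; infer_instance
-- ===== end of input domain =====

-- B replaces A's per-entry startswith scan by a set of normalized entries probed at each '/' boundary prefix of the path (alternative decomposition, same observable results).

-- ===== PORT A =====
def sspA_loop (norm_path : String) : List String → Bool
  | [] => false
  | entry :: rest =>
    let entry_norm := PySem.Str.stripChars (PySem.Str.replace entry "\\" "/") "/"
    if entry_norm == "" then sspA_loop norm_path rest
    else if PySem.Str.isIn "/" entry_norm then
      (if norm_path == entry_norm || PySem.Str.startswith norm_path (entry_norm ++ "/") then true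
       else sspA_loop norm_path rest)
    else
      (if norm_path == entry_norm || PySem.Str.startswith norm_path (entry_norm ++ "/") then true
       else sspA_loop norm_path rest)

def should_skip_path_py (rel_path : String) (skip_dirs : List String) : Bool :=
  if skip_dirs.isEmpty then false
  else sspA_loop (PySem.Str.stripChars (PySem.Str.replace rel_path "\\" "/") "/") skip_dirs

-- ===== PORT B =====
def pvNorm (s : String) : String := PySem.Str.stripChars (PySem.Str.replace s "\\" "/") "/"

def should_skip_path_py_alt (rel_path : String) (skip_dirs : List String) : Bool :=
  let entries : PySem.Set String :=
    PySem.Set.ofList ((skip_dirs.map pvNorm).filter (fun e => !(e == "")))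
  let norm_path := pvNorm rel_path
  if PySem.Set.contains entries norm_path then true
  else
    (PySem.List.enumerate norm_path.toList 0).any (fun ic =>
      ic.2 == '/' && PySem.Set.contains entries (PySem.Str.slice norm_path none (some ic.1)))

-- ===== PRECONDITION & SPEC =====
def Spec_should_skip_path_py (rel_path : String) (skip_dirs : List String) (out : Bool) : Prop := out = should_skip_path_py_alt rel_path skip_dirs
instance (rel_path : String) (skip_dirs : List String) (out : Bool) : Decidable (Spec_should_skip_path_py rel_path skip_dirs out) := by unfold Spec_should_skip_path_py; infer_instance

-- ===== CLAIM (what is proved, stated in full; the proofs are below) =====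
def Claim_equal_should_skip_path_py : Prop := ∀ (rel_path : String) (skip_dirs : List String), Dom_should_skip_path_py rel_path skip_dirs → Spec_should_skip_path_py rel_path skip_dirs (should_skip_path_py rel_path skip_dirs)

-- ===== LEMMAS AND PROOFS =====

-- A's loop as an 'any' over the entries (the two identical branches of A collapse).
theorem sspA_loop_eq_any (np : String) (l : List String) :
    sspA_loop np l =
      l.any (fun e => !(pvNorm e == "") &&
        (np == pvNorm e || PySem.Str.startswith np (pvNorm e ++ "/"))) := by
  induction l with
  | nil => rfl
  | cons e rest ih =>
    simp only [sspA_loop, pvNorm, List.any_cons]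
    split_ifs with h1 h2 h3 h4 <;> simp_all [pvNorm]

-- a '/'-boundary prefix characterised by its cut position
theorem boundary_iff (cs es : List Char) :
    (es ++ ['/']) <+: cs ↔ ∃ k : Nat, ∃ _ : k < cs.length, cs[k] = '/' ∧ es = cs.take k := by
  constructor
  · rintro ⟨t, ht⟩
    have hcs : cs = es ++ '/' :: t := by simpa using ht.symm
    subst hcs
    refine ⟨es.length, by simp, ?_, by simp⟩
    simp
  · rintro ⟨k, h, h1, h2⟩
    have hk : cs.take (k + 1) = cs.take k ++ ['/'] := by
      rw [List.take_add_one]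
      simp [List.getElem?_eq_getElem h, h1]
    rw [h2, ← hk]
    exact List.take_prefix _ _

-- one entry matches the path iff it is the path itself or a '/'-boundary prefix of it
theorem match_iff (np en : String) :
    (np == en || PySem.Str.startswith np (en ++ "/")) = true ↔
      (en = np ∨ ∃ k : Nat, ∃ _ : k < np.toList.length,
        np.toList[k] = '/' ∧ en.toList = np.toList.take k) := by
  rw [Bool.or_eq_true, beq_iff_eq, PySem.Str.startswith_eq, PySem.Chars.startswith_iff]
  have : (en ++ "/").toList = en.toList ++ ['/'] := by simp
  rw [this, boundary_iff]
  constructor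
  · rintro (h | h)
    · exact Or.inl h.symm
    · exact Or.inr h
  · rintro (h | h)
    · exact Or.inl h.symm
    · exact Or.inr h

-- ===== VERDICT helpers =====
theorem if_true_or (c b : Bool) : (if c = true then true else b) = (c || b) := by
  cases c <;> simp

theorem A_eq_any (rel : String) (l : List String) :
    should_skip_path_py rel l = l.any (fun e => !(pvNorm e == "") &&
      (pvNorm rel == pvNorm e || PySem.Str.startswith (pvNorm rel) (pvNorm e ++ "/"))) := by
  cases l with
  | nil => rfl
  | cons x xs =>
    simp only [should_skip_path_py, List.isEmpty_cons, Bool.false_eq_true, if_false,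
      sspA_loop_eq_any]
    rfl

theorem B_eq (rel : String) (l : List String) :
    should_skip_path_py_alt rel l =
      (PySem.Set.contains (PySem.Set.ofList ((l.map pvNorm).filter (fun e => !(e == ""))))
          (pvNorm rel) ||
        (PySem.List.enumerate (pvNorm rel).toList 0).any (fun ic =>
          ic.2 == '/' && PySem.Set.contains
            (PySem.Set.ofList ((l.map pvNorm).filter (fun e => !(e == ""))))
            (PySem.Str.slice (pvNorm rel) none (some ic.1)))) := by
  rw [should_skip_path_py_alt, if_true_or]

-- ===== VERDICT (by name: the statement is the Claim_ definition above) =====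
theorem should_skip_path_py_spec : Claim_equal_should_skip_path_py := by
  intro rel_path skip_dirs _
  unfold Spec_should_skip_path_py
  rw [A_eq_any, B_eq, Bool.eq_iff_iff]
  set np := pvNorm rel_path with hnp
  set entries := PySem.Set.ofList ((skip_dirs.map pvNorm).filter (fun e => !(e == ""))) with hent
  have hmem : ∀ x : String, x ∈ entries ↔ ∃ e ∈ skip_dirs, pvNorm e = x ∧ x ≠ "" := by
    intro x
    rw [hent, PySem.Set.mem_ofList, List.mem_filter]
    constructor
    · rintro ⟨hx1, hx2⟩
      obtain ⟨e, he, hx1⟩ := List.mem_map.mp hx1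
      exact ⟨e, he, hx1, by simpa using hx2⟩
    · rintro ⟨e, he, h1, h2⟩
      exact ⟨h1 ▸ List.mem_map_of_mem he, by simpa using h2⟩
  rw [Bool.or_eq_true, List.any_eq_true, List.any_eq_true]
  constructor
  · rintro ⟨e, he, hcond⟩
    rw [Bool.and_eq_true, Bool.not_eq_eq_eq_not, Bool.not_true, beq_eq_false_iff_ne] at hcond
    obtain ⟨hne, hmatch⟩ := hcond
    rw [match_iff] at hmatch
    rcases hmatch with h1 | ⟨k, hk, hsl, htk⟩
    · left
      rw [PySem.Set.contains_iff, hmem]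
      exact ⟨e, he, h1, h1 ▸ hne⟩
    · right
      refine ⟨((k : Int), np.toList[k]), ?_, ?_⟩
      · rw [PySem.List.mem_enumerate_iff]
        exact ⟨k, hk, by simp⟩
      · simp only [hsl, beq_self_eq_true, Bool.true_and]
        rw [PySem.Set.contains_iff, hmem]
        have hx : pvNorm e = PySem.Str.slice np none (some ((k : Nat) : Int)) := by
          rw [String.ext_iff]
          simp only [PySem.Str.toList_slice, PySem.Chars.slice_eq_listSlice,
            PySem.List.slice_to_natCast]
          exact htk
        exact ⟨e, he, hx, hx ▸ hne⟩
  · rintro (hc | ⟨p, hp, hcond⟩)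
    · rw [PySem.Set.contains_iff, hmem] at hc
      obtain ⟨e, he, hpe, hne⟩ := hc
      refine ⟨e, he, ?_⟩
      rw [Bool.and_eq_true, Bool.not_eq_eq_eq_not, Bool.not_true, beq_eq_false_iff_ne]
      exact ⟨hpe ▸ hne, (match_iff np (pvNorm e)).mpr (Or.inl hpe)⟩
    · rw [PySem.List.mem_enumerate_iff] at hp
      obtain ⟨k, hk, hp⟩ := hp
      subst hp
      rw [Bool.and_eq_true, beq_iff_eq] at hcond
      obtain ⟨hsl, hc⟩ := hcond
      rw [PySem.Set.contains_iff, hmem] at hc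
      obtain ⟨e, he, hpe, hne⟩ := hc
      refine ⟨e, he, ?_⟩
      rw [Bool.and_eq_true, Bool.not_eq_eq_eq_not, Bool.not_true, beq_eq_false_iff_ne]
      refine ⟨hpe ▸ hne, ?_⟩
      rw [match_iff]
      refine Or.inr ⟨k, hk, hsl, ?_⟩
      have := congrArg String.toList hpe
      simp only [PySem.Str.toList_slice, PySem.Chars.slice_eq_listSlice] at this
      rw [this, show ((0 : Int) + (k : Nat)) = ((k : Nat) : Int) by omega,
        PySem.List.slice_to_natCast]
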